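-- pv_equiv track=rewrite | github.com/projetmbc/for-writing | @prism/tools/building/06-pre-doc/01-MAIN-vs-LOCAL-slow.py | lower_names_kept
-- ===== SOURCE A (Python) =====
-- def lower_names_kept(
--     main_set: set[str],
--     alt_set : set[str]
-- ) -> list[str]:
--     lower_2_std = {
--         x.lower(): x
--         for x in main_set
--     }
--
--     _main_set = set(x.lower() for x in main_set)
--     _alt_set  = set(x.lower() for x in alt_set)
--
--     return sorted(
--         lower_2_std[x]
--         for x in _main_set - _alt_set
--     )
-- ===== SOURCE B (Python) =====
-- def lower_names_kept(
--     main_set: set[str],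
--     alt_set : set[str]
-- ) -> list[str]:
--     alt_sorted = sorted({x.lower() for x in alt_set})
--
--     def absent(lx):
--         lo, hi = 0, len(alt_sorted)
--         while lo < hi:
--             mid = (lo + hi) // 2
--             if alt_sorted[mid] < lx:
--                 lo = mid + 1
--             else:
--                 hi = mid
--         return lo == len(alt_sorted) or alt_sorted[lo] != lx
--
--     return sorted(x for x in main_set if absent(x.lower()))
-- ===== Notes on version B (the rewrite author's own statement) =====
-- stated objective: alternative
-- what changed: B replaces A's hash-set machinery (lower-to-original dict, two lowered sets, set difference, dict lookups) with a sorted lowered-alt array queried by hand-written binary search while filtering main_set directly, trading O(1) hashing for O(log m) comparisons.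
-- outside the precondition, e.g. on lower_names_kept({'a', 'A'}, {'a'}): A returns [], B returns []
import Mathlib
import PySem

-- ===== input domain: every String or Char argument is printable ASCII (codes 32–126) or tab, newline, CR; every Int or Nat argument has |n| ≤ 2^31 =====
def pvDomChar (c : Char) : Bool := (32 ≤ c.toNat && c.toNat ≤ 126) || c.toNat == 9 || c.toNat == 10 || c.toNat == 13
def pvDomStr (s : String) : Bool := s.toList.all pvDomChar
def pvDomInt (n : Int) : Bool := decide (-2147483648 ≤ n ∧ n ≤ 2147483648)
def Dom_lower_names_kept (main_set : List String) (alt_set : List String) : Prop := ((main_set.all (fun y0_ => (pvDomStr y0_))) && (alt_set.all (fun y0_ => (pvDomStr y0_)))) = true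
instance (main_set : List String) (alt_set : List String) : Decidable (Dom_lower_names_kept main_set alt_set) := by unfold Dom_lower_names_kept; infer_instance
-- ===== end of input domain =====

-- B replaces A's hash-set machinery (dict + two lowered sets + set difference) by a sorted
-- lowered-alt array queried by hand-written binary search while filtering main_set directly.


-- ===== PORT A =====
def lower_names_kept (main_set : List String) (alt_set : List String) : List String :=
  let lower_2_std : PySem.Dict String String :=
    main_set.foldl (fun d x => d.insert (PySem.Str.lower x) x) PySem.Dict.empty
  let _main_set : PySem.Set String := PySem.Set.ofList (main_set.map PySem.Str.lower)
  let _alt_set : PySem.Set String := PySem.Set.ofList (alt_set.map PySem.Str.lower)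
  -- the subscript lower_2_std[x] never raises (every element of the difference is the
  -- lowercase of a main_set element, hence a key of the dict), so getD with a dummy
  -- default is exact here
  PySem.List.sorted ((PySem.Set.diff _main_set _alt_set).map (fun x => lower_2_std.getD x "")) (fun x => x) false

-- ===== PORT B =====
-- the while-loop of Source B's `absent`: lo/hi are the loop state
def pvBsearch (s : List String) (lx : String) (lo hi : Nat) : Nat :=
  if lo < hi then
    let mid := (lo + hi) / 2
    if s.getD mid "" < lx then pvBsearch s lx (mid + 1) hi
    else pvBsearch s lx lo mid
  else lo
termination_by hi - lo
decreasing_by all_goals omega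

def pvAbsent (s : List String) (lx : String) : Bool :=
  let lo := pvBsearch s lx 0 s.length
  -- alt_sorted[mid] / alt_sorted[lo] are only read at indices < len(alt_sorted), so
  -- getD with a dummy default is exact
  lo == s.length || !(s.getD lo "" == lx)

def lower_names_kept_alt (main_set : List String) (alt_set : List String) : List String :=
  let alt_sorted : List String :=
    PySem.List.sorted (PySem.Set.ofList (alt_set.map PySem.Str.lower)) (fun x => x) false
  PySem.List.sorted (main_set.filter (fun x => pvAbsent alt_sorted (PySem.Str.lower x))) (fun x => x) false

-- ===== PRECONDITION & SPEC =====
-- Pre_ excludes main sets containing two distinct originals with the same lowercase: there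
-- A's surviving representative per lowercase depends on Python's unspecified set iteration
-- order (and A keeps one representative while B keeps all), so no single value is
-- specified; both programs still return on such inputs.
def Pre_lower_names_kept (main_set : List String) (alt_set : List String) : Prop :=
  (main_set.map PySem.Str.lower).Nodup
instance (main_set : List String) (alt_set : List String) : Decidable (Pre_lower_names_kept main_set alt_set) := by unfold Pre_lower_names_kept; infer_instance

def pvWitness_lower_names_kept : List String × List String := (["Bob", "alice"], ["ALICE"])

def Spec_lower_names_kept (main_set : List String) (alt_set : List String) (out : List String) : Prop := out = lower_names_kept_alt main_set alt_set
instance (main_set : List String) (alt_set : List String) (out : List String) : Decidable (Spec_lower_names_kept main_set alt_set out) := by unfold Spec_lower_names_kept; infer_instance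

-- ===== CLAIM (what is proved, stated in full; the proofs are below) =====
def Claim_equal_lower_names_kept : Prop := ∀ (main_set : List String) (alt_set : List String), Dom_lower_names_kept main_set alt_set → Pre_lower_names_kept main_set alt_set → Spec_lower_names_kept main_set alt_set (lower_names_kept main_set alt_set)

-- ===== LEMMAS AND PROOFS =====

-- set(xs) of a duplicate-free list is the list itself
theorem foldl_add_nodup (xs acc : List String) (hnd : xs.Nodup)
    (hfresh : ∀ x ∈ xs, x ∉ acc) : xs.foldl PySem.Set.add acc = acc ++ xs := by
  induction xs generalizing acc with
  | nil => simp
  | cons y ys ih =>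
    have hy : y ∉ acc := hfresh y (by simp)
    have hadd : PySem.Set.add acc y = acc ++ [y] := by
      simp [PySem.Set.add, PySem.Set.contains, hy]
    rw [List.foldl_cons, hadd, ih (acc ++ [y]) (List.Nodup.of_cons hnd) ?_]
    · simp
    · intro x hx hmem
      rcases List.mem_append.1 hmem with h | h
      · exact hfresh x (by simp [hx]) h
      · simp at h
        exact (List.nodup_cons.1 hnd).1 (h ▸ hx)

theorem ofList_nodup (xs : List String) (hnd : xs.Nodup) : PySem.Set.ofList xs = xs := by
  simpa [PySem.Set.ofList, PySem.Set.empty] using foldl_add_nodup xs [] hnd (by simp)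

-- items of A's dict-comprehension fold
theorem itemsA (l : List String) (acc : List (String × String))
    (hnd : (l.map PySem.Str.lower).Nodup)
    (hfresh : ∀ x ∈ l, ∀ p ∈ acc, p.1 ≠ PySem.Str.lower x) :
    (l.foldl (fun d x => d.insert (PySem.Str.lower x) x) (PySem.Dict.mk acc)).items
      = acc ++ l.map (fun x => (PySem.Str.lower x, x)) := by
  induction l generalizing acc with
  | nil => simp
  | cons y ys ih =>
    have hc : (PySem.Dict.mk acc).contains (PySem.Str.lower y) = false := by
      simp only [PySem.Dict.contains, List.any_eq_false]
      intro p hp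
      simpa using hfresh y (by simp) p hp
    have hins : (PySem.Dict.mk acc).insert (PySem.Str.lower y) y
        = PySem.Dict.mk (acc ++ [(PySem.Str.lower y, y)]) := by
      simp [PySem.Dict.insert, hc]
    rw [List.foldl_cons, hins,
      ih (acc ++ [(PySem.Str.lower y, y)]) (by simpa using hnd.of_cons) ?_]
    · rw [List.append_assoc]; rfl
    · intro x hx p hp
      rcases List.mem_append.1 hp with h | h
      · exact hfresh x (by simp [hx]) p h
      · simp at h
        subst h
        simp only [List.map_cons, List.nodup_cons, List.mem_map] at hnd
        intro hEq
        exact hnd.1 ⟨x, hx, hEq.symm⟩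

-- looking a lowercase key back up in A's dict returns the original
theorem getA (l : List String) (x : String) (hnd : (l.map PySem.Str.lower).Nodup)
    (hx : x ∈ l) :
    (PySem.Dict.mk (l.map (fun y => (PySem.Str.lower y, y)))).get? (PySem.Str.lower x) = some x := by
  induction l with
  | nil => simp at hx
  | cons y ys ih =>
    simp only [List.map_cons] at *
    rcases List.mem_cons.1 hx with rfl | hmem
    · simp [PySem.Dict.get?, List.find?]
    · have hne : (PySem.Str.lower y == PySem.Str.lower x) = false := by
        simp only [List.nodup_cons, List.mem_map] at hnd
        simp only [beq_eq_false_iff_ne, ne_eq]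
        intro hEq
        exact hnd.1 ⟨x, hmem, hEq.symm⟩
      simp only [PySem.Dict.get?, List.find?, hne] at *
      exact ih hnd.of_cons hmem

-- invariant of Source B's binary-search loop
theorem pvBsearch_spec (s : List String) (lx : String) (lo hi : Nat)
    (hhi : hi ≤ s.length) (hs : s.Pairwise (· ≤ ·)) :
    lo ≤ pvBsearch s lx lo hi ∧ pvBsearch s lx lo hi ≤ max lo hi ∧
    (∀ i, lo ≤ i → i < pvBsearch s lx lo hi → s.getD i "" < lx) ∧
    (∀ i, pvBsearch s lx lo hi ≤ i → i < hi → ¬ s.getD i "" < lx) := by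
  have hpw := List.pairwise_iff_getElem.1 hs
  fun_induction pvBsearch s lx lo hi with
  | case1 lo hi h mid hlt ih =>
    obtain ⟨h1, h2, h3, h4⟩ := ih (by omega)
    have hmlo : lo ≤ mid := by omega
    have hmhi : mid < hi := by omega
    refine ⟨by omega, by omega, ?_, h4⟩
    intro i hi1 hi2
    by_cases hc : i < mid
    · have hiL : i < s.length := by omega
      have hmL : mid < s.length := by omega
      have hle' : s[i] ≤ s[mid] := hpw i mid hiL hmL hc
      have : s.getD i "" = s[i] := List.getD_eq_getElem s "" hiL
      rw [this]
      rw [List.getD_eq_getElem s "" hmL] at hlt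
      exact lt_of_le_of_lt hle' hlt
    · by_cases hc2 : i = mid
      · subst hc2; exact hlt
      · exact h3 i (by omega) hi2
  | case2 lo hi h mid hlt ih =>
    obtain ⟨h1, h2, h3, h4⟩ := ih (by omega)
    have hmlo : lo ≤ mid := by omega
    have hmhi : mid < hi := by omega
    refine ⟨h1, by omega, h3, ?_⟩
    intro i hi1 hi2
    by_cases hc : i < mid
    · exact h4 i hi1 (by omega)
    · have hiL : i < s.length := by omega
      have hmL : mid < s.length := by omega
      intro hlt2
      apply hlt
      rw [List.getD_eq_getElem s "" hmL]
      rw [List.getD_eq_getElem s "" hiL] at hlt2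
      by_cases hc2 : mid = i
      · subst hc2; exact hlt2
      · exact lt_of_le_of_lt (hpw mid i hmL hiL (by omega)) hlt2
  | case3 lo hi h =>
    exact ⟨le_refl _, by omega, by omega, by omega⟩

-- binary search decides membership in a sorted list
theorem pvAbsent_iff (s : List String) (lx : String) (hs : s.Pairwise (· ≤ ·)) :
    pvAbsent s lx = true ↔ lx ∉ s := by
  obtain ⟨h1, h2, h3, h4⟩ := pvBsearch_spec s lx 0 s.length (le_refl _) hs
  show (pvBsearch s lx 0 s.length == s.length || !(s.getD (pvBsearch s lx 0 s.length) "" == lx)) = true ↔ lx ∉ s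
  constructor
  · intro habs hmem
    obtain ⟨j, hjL, hj⟩ := List.mem_iff_getElem.1 hmem
    rcases Nat.lt_or_ge j (pvBsearch s lx 0 s.length) with hc | hc
    · have hlt := h3 j (by omega) hc
      rw [List.getD_eq_getElem s "" hjL, hj] at hlt
      exact lt_irrefl _ hlt
    · have hkL : pvBsearch s lx 0 s.length < s.length := by omega
      have hne : s.getD (pvBsearch s lx 0 s.length) "" ≠ lx := by
        simp only [Bool.or_eq_true, beq_iff_eq, Bool.not_eq_true', beq_eq_false_iff_ne] at habs
        rcases habs with h | h
        · omega
        · exact h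
      have hnl := h4 (pvBsearch s lx 0 s.length) (le_refl _) hkL
      have hle2 : s[pvBsearch s lx 0 s.length] ≤ s[j] := by
        rcases Nat.eq_or_lt_of_le hc with heq | hlt
        · simp [heq]
        · exact (List.pairwise_iff_getElem.1 hs) _ j hkL hjL hlt
      rw [List.getD_eq_getElem s "" hkL] at hne hnl
      exact hne (le_antisymm (hj ▸ hle2) (not_lt.1 hnl))
  · intro hnot
    simp only [Bool.or_eq_true, beq_iff_eq, Bool.not_eq_true', beq_eq_false_iff_ne]
    by_cases hkl : pvBsearch s lx 0 s.length = s.length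
    · exact Or.inl hkl
    · right
      intro heq
      apply hnot
      have hkL : pvBsearch s lx 0 s.length < s.length := by omega
      rw [List.getD_eq_getElem s "" hkL] at heq
      exact heq ▸ List.getElem_mem hkL

-- ===== VERDICT (by name: the statement is the Claim_ definition above) =====
theorem lower_names_kept_spec : Claim_equal_lower_names_kept := by
  intro main_set alt_set _ hpre
  unfold Spec_lower_names_kept lower_names_kept lower_names_kept_alt
  have hpre' : (main_set.map PySem.Str.lower).Nodup := hpre
  simp only []
  have hA := itemsA main_set [] hpre' (by simp)
  simp only [List.nil_append] at hA
  rw [PySem.Set.diff, ofList_nodup _ hpre', List.filter_map, List.map_map]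
  have hdict : (main_set.foldl (fun d x => d.insert (PySem.Str.lower x) x) PySem.Dict.empty)
      = PySem.Dict.mk (main_set.map (fun y => (PySem.Str.lower y, y))) := PySem.Dict.ext hA
  congr 1
  -- the mapped lookup is the identity on elements of main_set
  have hmapid : ∀ a ∈ main_set.filter ((fun x => !(PySem.Set.ofList (alt_set.map PySem.Str.lower)).contains x) ∘ PySem.Str.lower),
      ((fun x => (main_set.foldl (fun d x => d.insert (PySem.Str.lower x) x) PySem.Dict.empty).getD x "") ∘ PySem.Str.lower) a = (fun x : String => x) a := by
    intro x hx
    have hxm : x ∈ main_set := (List.mem_filter.1 hx).1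
    have hget := getA main_set x hpre' hxm
    simp only [Function.comp_apply, hdict, PySem.Dict.getD, hget, Option.getD_some]
  rw [List.map_congr_left hmapid]
  simp only [List.map_id_fun', id]
  -- the two filter conditions agree
  apply List.filter_congr
  intro x _
  simp only [Function.comp_apply]
  by_cases hm : PySem.Str.lower x ∈ PySem.Set.ofList (alt_set.map PySem.Str.lower)
  · have hmem : PySem.Str.lower x ∈
        PySem.List.sorted (PySem.Set.ofList (alt_set.map PySem.Str.lower)) (fun x => x) false :=
      (PySem.List.mem_sorted _ _ _ _).2 hm
    have habs : pvAbsent (PySem.List.sorted (PySem.Set.ofList (alt_set.map PySem.Str.lower)) (fun x => x) false)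
        (PySem.Str.lower x) = false := by
      rw [← Bool.not_eq_true, pvAbsent_iff _ _ (PySem.List.sorted_pairwise _ _), not_not]
      exact hmem
    rw [habs, (PySem.Set.contains_iff _ _).2 hm]
    rfl
  · have habs : pvAbsent (PySem.List.sorted (PySem.Set.ofList (alt_set.map PySem.Str.lower)) (fun x => x) false)
        (PySem.Str.lower x) = true := by
      rw [pvAbsent_iff _ _ (PySem.List.sorted_pairwise _ _)]
      intro hmem
      exact hm ((PySem.List.mem_sorted _ _ _ _).1 hmem)
    have hcon : (PySem.Set.ofList (alt_set.map PySem.Str.lower)).contains (PySem.Str.lower x) = false := by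
      rw [← Bool.not_eq_true, PySem.Set.contains_iff]
      exact hm
    rw [habs, hcon]
    rfl
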